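-- pv_equiv track=rewrite | github.com/Kritika-Jha/Sanjeevani | backend/triage.py | sanitize_actions
-- ===== SOURCE A (Python) =====
-- from typing import List, Dict, Any, Literal
--
-- SAFE_WORD_BLACKLIST = {"tablet", "capsule", "syrup", "antibiotic", "ibuprofen", "paracetamol", "medicine", "drug"}
--
-- def sanitize_actions(actions: List[str]) -> List[str]:
--     out = []
--     for a in actions:
--         t = a.lower()
--         if any(w in t for w in SAFE_WORD_BLACKLIST):
--             continue
--         out.append(a)
--     return out
-- ===== SOURCE B (Python) =====
-- SAFE_WORD_BLACKLIST = {"tablet", "capsule", "syrup", "antibiotic", "ibuprofen", "paracetamol", "medicine", "drug"}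
--
-- _WORDS = tuple(sorted(SAFE_WORD_BLACKLIST))
--
-- def _blocked(t):
--     # single left-to-right scan: at each position, does some blacklist word start here?
--     return any(t.startswith(_WORDS, i) for i in range(len(t)))
--
-- def sanitize_actions(actions):
--     return [a for a in actions if not _blocked(a.lower())]
-- ===== Notes on version B (the rewrite author's own statement) =====
-- stated objective: alternative
-- what changed: Instead of A's per-word substring searches (a fresh scan of the string for each blacklist word), B makes one left-to-right scan of the lowercased string and at each position checks whether any blacklist word starts there via str.startswith with a tuple, building the result with a comprehension instead of an accumulator loop.
import Mathlib
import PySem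

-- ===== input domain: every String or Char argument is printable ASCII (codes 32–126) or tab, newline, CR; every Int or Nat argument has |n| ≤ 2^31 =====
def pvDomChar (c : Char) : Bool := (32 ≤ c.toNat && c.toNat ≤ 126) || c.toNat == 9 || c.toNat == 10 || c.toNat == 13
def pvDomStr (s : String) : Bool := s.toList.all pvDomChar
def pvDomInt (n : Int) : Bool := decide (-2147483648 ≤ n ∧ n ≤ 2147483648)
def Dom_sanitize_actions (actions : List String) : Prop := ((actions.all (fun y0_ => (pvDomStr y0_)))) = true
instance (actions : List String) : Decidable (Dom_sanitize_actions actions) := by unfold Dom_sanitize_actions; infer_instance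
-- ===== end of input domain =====

-- B replaces A's per-word substring searches by one positional scan of the lowercased
-- string (at each index, is some blacklist word a prefix there?) and a comprehension
-- instead of an accumulator loop; alternative decomposition, same cost.

-- ===== PORT A =====
-- SAFE_WORD_BLACKLIST (set literal; iteration order irrelevant under any())
def pvBlacklistA : List String :=
  ["tablet", "capsule", "syrup", "antibiotic", "ibuprofen", "paracetamol", "medicine", "drug"]

def sanitize_actions (actions : List String) : List String :=
  actions.foldl (fun out a =>
    let t := PySem.Str.lower a
    if pvBlacklistA.any (fun w => PySem.Str.isIn w t) then out
    else out ++ [a]) []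

-- ===== PORT B =====
-- _WORDS = tuple(sorted(SAFE_WORD_BLACKLIST))
def pvWordsB : List (List Char) :=
  ["antibiotic".toList, "capsule".toList, "drug".toList, "ibuprofen".toList,
   "medicine".toList, "paracetamol".toList, "syrup".toList, "tablet".toList]

-- _blocked: t.startswith(_WORDS, i) for i in range(len(t))
def pvBlockedB (t : List Char) : Bool :=
  (List.range t.length).any (fun i => pvWordsB.any (fun w => PySem.Chars.startswith (t.drop i) w))

def sanitize_actions_alt (actions : List String) : List String :=
  actions.filter (fun a => !pvBlockedB (PySem.Str.lower a).toList)

-- ===== PRECONDITION & SPEC =====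
def Spec_sanitize_actions (actions : List String) (out : List String) : Prop := out = sanitize_actions_alt actions
instance (actions : List String) (out : List String) : Decidable (Spec_sanitize_actions actions out) := by unfold Spec_sanitize_actions; infer_instance

-- ===== CLAIM (what is proved, stated in full; the proofs are below) =====
def Claim_equal_sanitize_actions : Prop := ∀ (actions : List String), Dom_sanitize_actions actions → Spec_sanitize_actions actions (sanitize_actions actions)

-- ===== LEMMAS AND PROOFS =====

-- the two word lists hold the same words, as String vs List Char
lemma pv_words_ab (w : String) (hw : w ∈ pvBlacklistA) : w.toList ∈ pvWordsB ∧ w.toList ≠ [] := by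
  fin_cases hw <;> exact ⟨by decide, by decide⟩

lemma pv_words_ba (w : List Char) (hw : w ∈ pvWordsB) : ∃ s ∈ pvBlacklistA, s.toList = w := by
  fin_cases hw
  · exact ⟨"antibiotic", by decide, rfl⟩
  · exact ⟨"capsule", by decide, rfl⟩
  · exact ⟨"drug", by decide, rfl⟩
  · exact ⟨"ibuprofen", by decide, rfl⟩
  · exact ⟨"medicine", by decide, rfl⟩
  · exact ⟨"paracetamol", by decide, rfl⟩
  · exact ⟨"syrup", by decide, rfl⟩
  · exact ⟨"tablet", by decide, rfl⟩

-- the two blocking tests agree on every string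
lemma pv_bad_eq (t : String) :
    pvBlacklistA.any (fun w => PySem.Str.isIn w t) = pvBlockedB t.toList := by
  rw [Bool.eq_iff_iff]
  simp only [List.any_eq_true, pvBlockedB, List.mem_range, PySem.Chars.startswith_iff]
  constructor
  · rintro ⟨w, hw, hin⟩
    rw [PySem.Str.isIn_iff_infix] at hin
    obtain ⟨j, hj⟩ := ((PySem.Chars.exists_prefix_drop_iff_isIn w.toList t.toList).trans
      (PySem.Chars.isIn_iff_infix w.toList t.toList)).mpr hin
    obtain ⟨hmem, hne⟩ := pv_words_ab w hw
    refine ⟨j, ?_, w.toList, hmem, hj⟩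
    by_contra hlt
    rw [List.drop_eq_nil_of_le (by omega)] at hj
    exact hne (List.prefix_nil.mp hj)
  · rintro ⟨i, _, w, hw, hpre⟩
    obtain ⟨s, hs, hst⟩ := pv_words_ba w hw
    refine ⟨s, hs, ?_⟩
    rw [PySem.Str.isIn_iff_infix, hst]
    exact ((PySem.Chars.exists_prefix_drop_iff_isIn w t.toList).trans
      (PySem.Chars.isIn_iff_infix w t.toList)).mp ⟨i, hpre⟩

-- ===== VERDICT (by name: the statement is the Claim_ definition above) =====
theorem sanitize_actions_spec : Claim_equal_sanitize_actions := by
  intro actions _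
  show sanitize_actions actions = sanitize_actions_alt actions
  unfold sanitize_actions sanitize_actions_alt
  have h : ∀ (out : List String) (a : String),
      (if pvBlacklistA.any (fun w => PySem.Str.isIn w (PySem.Str.lower a)) then out
       else out ++ [a])
      = (if (!pvBlockedB (PySem.Str.lower a).toList) = true then out ++ [a] else out) := by
    intro out a
    rw [pv_bad_eq]
    rcases pvBlockedB (PySem.Str.lower a).toList <;> simp
  simp only [h]
  simpa using PySem.List.foldl_append_if (fun a => !pvBlockedB (PySem.Str.lower a).toList) (id : String → String) actions []
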